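-- pv_equiv track=rewrite | github.com/MrBrantCode/unitest_baseline | mut_generate/mist_train_cf/cf_72328/solution.py | find_prime_palindromes
-- ===== SOURCE A (Python) =====
-- def find_prime_palindromes(limit):
--     def is_prime(n):
--         if n <= 1:
--             return False
--         elif n <= 3:
--             return True
--         elif n%2 == 0 or n%3 == 0:
--             return False
--         i = 5
--         while i * i <= n:
--             if n%i == 0 or n%(i + 2) == 0:
--                 return False
--             i = i + 6
--         return True
--
--     def is_palindrome(n):
--         return str(n) == str(n)[::-1]
--
--     prime_palindromes = []
--     for num in range(limit+1):
--         if is_prime(num) and is_palindrome(num):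
--             prime_palindromes.append(num)
--     return prime_palindromes
-- ===== SOURCE B (Python) =====
-- def find_prime_palindromes(limit):
--     if limit < 2:
--         return []
--     sieve = [True] * (limit + 1)
--     sieve[0] = False
--     sieve[1] = False
--     i = 2
--     while i * i <= limit:
--         for m in range(i, limit // i + 1):
--             sieve[i * m] = False
--         i += 1
--     return [n for n in range(limit + 1) if sieve[n] and str(n) == str(n)[::-1]]
-- ===== Notes on version B (the rewrite author's own statement) =====
-- stated objective: faster
-- what changed: B replaces A's per-number trial-division primality test (6k±1 wheel up to sqrt(n) for every n in 0..limit) by a sieve of Eratosthenes: one boolean array in which each i with i*i<=limit marks its multiples i*i..limit composite, after which primality is an O(1) array lookup per candidate.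
import Mathlib
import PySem

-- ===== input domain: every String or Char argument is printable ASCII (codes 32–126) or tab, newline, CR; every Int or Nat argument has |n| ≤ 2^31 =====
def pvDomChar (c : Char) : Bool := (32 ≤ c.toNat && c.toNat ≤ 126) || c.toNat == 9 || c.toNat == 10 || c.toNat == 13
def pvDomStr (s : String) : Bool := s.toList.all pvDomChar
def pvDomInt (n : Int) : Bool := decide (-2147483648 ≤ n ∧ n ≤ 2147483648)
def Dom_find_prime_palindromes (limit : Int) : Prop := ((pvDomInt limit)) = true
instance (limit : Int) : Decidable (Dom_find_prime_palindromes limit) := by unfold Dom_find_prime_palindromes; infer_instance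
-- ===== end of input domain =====

-- B keeps A's return value everywhere but replaces A's per-number trial-division
-- primality test by a sieve of Eratosthenes over one boolean array, so primality
-- of each candidate becomes a single array lookup.

-- ===== PORT A =====

-- shared helper: Python 'str(n) == str(n)[::-1]' (both A and B contain this exact line)
def pyIsPalindrome (n : Int) : Bool :=
  some (PySem.Int.toStr n) == PySem.Str.slice? (PySem.Int.toStr n) none none (-1)

-- A's wheel loop: 'i = 5; while i*i <= n: if n%i==0 or n%(i+2)==0: return False; i += 6'
-- (fuel-based structural recursion; 'n.toNat' fuel is enough since i grows by 6 each pass)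
def wheelLoopA (fuel : Nat) (n i : Int) : Bool :=
  match fuel with
  | 0 => true
  | f + 1 =>
    if i * i ≤ n then
      if PySem.Int.mod n i == 0 || PySem.Int.mod n (i + 2) == 0 then false
      else wheelLoopA f n (i + 6)
    else true

-- A's is_prime
def isPrimeA (n : Int) : Bool :=
  if n ≤ 1 then false
  else if n ≤ 3 then true
  else if PySem.Int.mod n 2 == 0 || PySem.Int.mod n 3 == 0 then false
  else wheelLoopA n.toNat n 5

def find_prime_palindromes (limit : Int) : List Int :=
  (PySem.List.pyRange 0 (limit + 1) 1).foldl
    (fun acc num => if isPrimeA num && pyIsPalindrome num then acc ++ [num] else acc) []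

-- ===== PORT B =====

-- B's inner loop: 'for m in range(i, limit // i + 1): sieve[i * m] = False'
-- (the Python list is an Array; the index i*m is always in bounds, so the total
-- 'setIfInBounds' is an exact transcription of the assignment)
def innerMark (limit : Int) (a : Array Bool) (i : Int) : Array Bool :=
  (PySem.List.pyRange i (PySem.Int.floordiv limit i + 1) 1).foldl
    (fun a m => a.setIfInBounds (i * m).toNat false) a

-- B's outer loop: 'i = 2; while i*i <= limit: <inner>; i += 1'
-- (fuel-based structural recursion; 'limit.toNat' fuel is enough since i grows each pass)
def sieveLoopB (fuel : Nat) (limit : Int) (a : Array Bool) (i : Int) : Array Bool :=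
  match fuel with
  | 0 => a
  | f + 1 =>
    if i * i ≤ limit then sieveLoopB f limit (innerMark limit a i) (i + 1)
    else a

def find_prime_palindromes_alt (limit : Int) : List Int :=
  if limit < 2 then []
  else
    -- '[True] * (limit + 1)' then 'sieve[0] = sieve[1] = False' (indices 0,1 in bounds since limit ≥ 2)
    let sieve0 : Array Bool :=
      ((Array.replicate (limit + 1).toNat true).setIfInBounds 0 false).setIfInBounds 1 false
    let sieve := sieveLoopB limit.toNat limit sieve0 2
    -- 'sieve[n]' for n in range(limit+1): n is a valid nonnegative index, read by hand (exact there)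
    (PySem.List.pyRange 0 (limit + 1) 1).filter
      (fun n => sieve.getD n.toNat false && pyIsPalindrome n)

-- ===== PRECONDITION & SPEC =====
def Spec_find_prime_palindromes (limit : Int) (out : List Int) : Prop := out = find_prime_palindromes_alt limit
instance (limit : Int) (out : List Int) : Decidable (Spec_find_prime_palindromes limit out) := by unfold Spec_find_prime_palindromes; infer_instance

-- ===== CLAIM (what is proved, stated in full; the proofs are below) =====
def Claim_equal_find_prime_palindromes : Prop := ∀ (limit : Int), Dom_find_prime_palindromes limit → Spec_find_prime_palindromes limit (find_prime_palindromes limit)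

-- ===== LEMMAS AND PROOFS =====

-- "n has no divisor e with 2 ≤ e and e*e ≤ n" — the common spec of both primality mechanisms
def NoSmallDiv (n : Int) : Prop := ∀ e : Int, 2 ≤ e → e * e ≤ n → ¬ e ∣ n

-- every candidate divisor is at most n
theorem cand_le (e n : Int) (he : 2 ≤ e) (hee : e * e ≤ n) : e ≤ n :=
  le_trans (le_mul_of_one_le_right (by omega) (by omega)) hee

-- A's wheel decides NoSmallDiv once divisibility by 2 and 3 is ruled out
theorem wheelLoopA_iff (fuel : Nat) (n i : Int) (hi5 : 5 ≤ i) (hmod : i % 6 = 5)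
    (hfuel : (n + 1 - i).toNat ≤ fuel)
    (h2 : ¬ (2 : Int) ∣ n) (h3 : ¬ (3 : Int) ∣ n)
    (hbelow : ∀ e : Int, 2 ≤ e → e < i → ¬ e ∣ n) :
    wheelLoopA fuel n i = true ↔ NoSmallDiv n := by
  cases fuel with
  | zero =>
    simp only [wheelLoopA]
    constructor
    · intro _ e he hee hedvd
      have hen : e ≤ n := cand_le e n he hee
      exact hbelow e he (by omega) hedvd
    · intro _; trivial
  | succ f =>
    rw [wheelLoopA]
    by_cases hle : i * i ≤ n
    · rw [if_pos hle]
      have hin : i ≤ n := cand_le i n (by omega) hle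
      by_cases hdi : PySem.Int.mod n i = 0 ∨ PySem.Int.mod n (i + 2) = 0
      · have hcond : (PySem.Int.mod n i == 0 || PySem.Int.mod n (i + 2) == 0) = true := by
          rcases hdi with h | h <;> simp [h]
        rw [if_pos hcond]
        constructor
        · intro h; exact absurd h (by simp)
        · intro hns; exfalso
          rcases hdi with h | h
          · exact hns i (by omega) hle ((PySem.Int.mod_eq_zero_iff_dvd n i).mp h)
          · have hdvd : (i + 2) ∣ n := (PySem.Int.mod_eq_zero_iff_dvd n (i + 2)).mp h
            by_cases hsq : (i + 2) * (i + 2) ≤ n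
            · exact hns (i + 2) (by omega) hsq hdvd
            · obtain ⟨c, hc⟩ := hdvd
              rw [not_le] at hsq
              have hc2 : 2 ≤ c := by nlinarith
              have hcc : c * c ≤ n := by nlinarith
              exact hns c hc2 hcc ⟨i + 2, by rw [hc]; ring⟩
      · rw [not_or] at hdi
        rw [if_neg (by simp [hdi.1, hdi.2])]
        refine wheelLoopA_iff f n (i + 6) (by omega) (by omega) (by omega) h2 h3 ?_
        intro e he helt hedvd
        by_cases helti : e < i
        · exact hbelow e he helti hedvd
        · have h2e : ¬ (2 : Int) ∣ e := fun hh => h2 (hh.trans hedvd)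
          have h3e : ¬ (3 : Int) ∣ e := fun hh => h3 (hh.trans hedvd)
          have hcases : e = i ∨ e = i + 2 := by omega
          rcases hcases with rfl | rfl
          · exact hdi.1 ((PySem.Int.mod_eq_zero_iff_dvd _ _).mpr hedvd)
          · exact hdi.2 ((PySem.Int.mod_eq_zero_iff_dvd _ _).mpr hedvd)
    · rw [if_neg hle]
      constructor
      · intro _ e he hee hedvd
        have helt : e < i := by nlinarith
        exact hbelow e he helt hedvd
      · intro _; rfl

-- A's is_prime returns true exactly on n ≥ 2 with no small divisor
theorem isPrimeA_iff (n : Int) : isPrimeA n = true ↔ (2 ≤ n ∧ NoSmallDiv n) := by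
  unfold isPrimeA
  by_cases h1 : n ≤ 1
  · rw [if_pos h1]; simp; omega
  · rw [if_neg h1]
    by_cases h3 : n ≤ 3
    · rw [if_pos h3]
      constructor
      · intro _; refine ⟨by omega, ?_⟩; intro e he hee _; nlinarith
      · intro _; rfl
    · rw [if_neg h3]
      by_cases h2d : (2 : Int) ∣ n
      · rw [if_pos (by simp; exact Or.inl h2d)]
        constructor
        · intro h; exact absurd h (by simp)
        · intro ⟨_, hns⟩; exact absurd h2d (hns 2 (by omega) (by nlinarith))
      · by_cases h3d : (3 : Int) ∣ n
        · rw [if_pos (by simp; exact Or.inr h3d)]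
          constructor
          · intro h; exact absurd h (by simp)
          · intro ⟨_, hns⟩
            have h9 : (9 : Int) ≤ n := by
              obtain ⟨c, hc⟩ := h3d
              have : 2 ≤ c := by omega
              omega
            exact absurd h3d (hns 3 (by omega) (by omega))
        · have hc2 : PySem.Int.mod n 2 ≠ 0 := fun h => h2d ((PySem.Int.mod_eq_zero_iff_dvd n 2).mp h)
          have hc3 : PySem.Int.mod n 3 ≠ 0 := fun h => h3d ((PySem.Int.mod_eq_zero_iff_dvd n 3).mp h)
          rw [if_neg (by simp; exact ⟨by omega, h3d⟩)]
          rw [wheelLoopA_iff n.toNat n 5 le_rfl (by norm_num) (by omega) h2d h3d ?_]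
          · constructor
            · intro h; exact ⟨by omega, h⟩
            · intro ⟨_, h⟩; exact h
          · intro e he helt hedvd
            have : e = 2 ∨ e = 3 ∨ e = 4 := by omega
            rcases this with rfl | rfl | rfl
            · exact h2d hedvd
            · exact h3d hedvd
            · exact h2d ((by norm_num : (2 : Int) ∣ 4).trans hedvd)

-- one in-place assignment through a nonnegative index, read back with getD
theorem setIf_getD_iff (a : Array Bool) (j : Int) (hj : 0 ≤ j) (n : Nat) :
    ((a.setIfInBounds j.toNat false).getD n false = true) ↔ (a.getD n false = true ∧ j ≠ (n : Int)) := by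
  by_cases hjn : j = (n : Int)
  · subst hjn
    simp only [Int.toNat_natCast]
    by_cases hlen : n < a.size
    · simp [Array.getD, hlen]
    · simp [Array.getD, hlen]
  · have hne : j.toNat ≠ n := by omega
    rw [Array.getD_eq_getD_getElem?, Array.getD_eq_getD_getElem?,
        Array.getElem?_setIfInBounds]
    simp [hne, hjn]

-- the mark loop, generically: after setting g j := False for all j in js,
-- position n is still True iff it was True and no g j hit it
theorem foldl_setIf_getD (g : Int → Int) (js : List Int) (a : Array Bool) (n : Nat)
    (hjs : ∀ j ∈ js, 0 ≤ g j) :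
    ((js.foldl (fun a j => a.setIfInBounds (g j).toNat false) a).getD n false = true)
      ↔ (a.getD n false = true ∧ ∀ j ∈ js, g j ≠ (n : Nat)) := by
  induction js generalizing a with
  | nil => simp
  | cons j t ih =>
    have hj : 0 ≤ g j := hjs j (by simp)
    simp only [List.foldl_cons]
    rw [ih _ (fun j hj => hjs j (by simp [hj])), setIf_getD_iff a (g j) hj n]
    constructor
    · rintro ⟨⟨h1, h2⟩, h3⟩
      refine ⟨h1, ?_⟩
      intro j' hj'
      rcases List.mem_cons.mp hj' with rfl | hm
      · exact h2
      · exact h3 j' hm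
    · rintro ⟨h1, h2⟩
      exact ⟨⟨h1, h2 j List.mem_cons_self⟩, fun j' hm => h2 j' (List.mem_cons_of_mem _ hm)⟩

-- "n gets marked composite by some pass d ≥ i of the sieve"
def Marked (limit i : Int) (n : Nat) : Prop :=
  ∃ d m : Int, i ≤ d ∧ d * d ≤ limit ∧ d ≤ m ∧ m ≤ PySem.Int.floordiv limit d ∧ (n : Int) = d * m

-- the effect of one inner pass on position n
theorem innerMark_getD (limit i : Int) (hi : 2 ≤ i) (a : Array Bool) (n : Nat) :
    ((innerMark limit a i).getD n false = true)
      ↔ (a.getD n false = true ∧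
         ¬ ∃ m : Int, i ≤ m ∧ m ≤ PySem.Int.floordiv limit i ∧ (n : Int) = i * m) := by
  unfold innerMark
  rw [foldl_setIf_getD (fun m => i * m) _ a n ?_]
  · constructor
    · intro ⟨h1, h2⟩
      refine ⟨h1, ?_⟩
      rintro ⟨m, hm1, hm2, hm3⟩
      exact h2 m (by rw [PySem.List.mem_pyRange_one]; omega) hm3.symm
    · intro ⟨h1, h2⟩
      refine ⟨h1, ?_⟩
      intro m hm heq
      rw [PySem.List.mem_pyRange_one] at hm
      exact h2 ⟨m, hm.1, by omega, heq.symm⟩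
  · intro m hm
    rw [PySem.List.mem_pyRange_one] at hm
    nlinarith [hm.1]

-- the whole sieve loop: position n survives iff it survives the initial list and is never marked
theorem sieveLoopB_getD (fuel : Nat) (limit : Int) : ∀ (i : Int) (a : Array Bool) (n : Nat),
    2 ≤ i → (limit + 1 - i).toNat ≤ fuel →
    (((sieveLoopB fuel limit a i).getD n false = true)
      ↔ (a.getD n false = true ∧ ¬ Marked limit i n)) := by
  induction fuel with
  | zero =>
    intro i a n h2 hfuel
    simp only [sieveLoopB]
    have hlim : limit < i := by omega
    constructor
    · intro h
      refine ⟨h, ?_⟩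
      rintro ⟨d, m, hd1, hd2, _, _, _⟩
      nlinarith
    · exact fun h => h.1
  | succ f ih =>
    intro i a n h2 hfuel
    rw [sieveLoopB]
    by_cases hle : i * i ≤ limit
    · rw [if_pos hle]
      rw [ih (i + 1) (innerMark limit a i) n (by omega) (by omega),
          innerMark_getD limit i h2 a n]
      constructor
      · intro ⟨⟨h1, h2'⟩, h3⟩
        refine ⟨h1, ?_⟩
        rintro ⟨d, m, hd1, hd2, hd3, hd4, hd5⟩
        by_cases hdi : d = i
        · subst hdi; exact h2' ⟨m, hd3, hd4, hd5⟩
        · exact h3 ⟨d, m, by omega, hd2, hd3, hd4, hd5⟩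
      · intro ⟨h1, h2'⟩
        refine ⟨⟨h1, ?_⟩, ?_⟩
        · rintro ⟨m, hm1, hm2, hm3⟩
          exact h2' ⟨i, m, le_rfl, hle, hm1, hm2, hm3⟩
        · rintro ⟨d, m, hd1, hd2, hd3, hd4, hd5⟩
          exact h2' ⟨d, m, by omega, hd2, hd3, hd4, hd5⟩
    · rw [if_neg hle]
      constructor
      · intro h
        refine ⟨h, ?_⟩
        rintro ⟨d, m, hd1, hd2, _, _, _⟩
        nlinarith
      · exact fun h => h.1

-- for candidates inside the table, "never marked" is exactly "no small divisor"
theorem not_marked_iff (limit : Int) (n : Nat) (hn : (n : Int) ≤ limit) :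
    ¬ Marked limit 2 n ↔ NoSmallDiv (n : Int) := by
  constructor
  · intro h e he hee hedvd
    obtain ⟨c, hc⟩ := hedvd
    have hec : e ≤ c := by nlinarith
    refine h ⟨e, c, he, by nlinarith, hec, ?_, hc⟩
    rw [PySem.Int.le_floordiv_iff_mul_le (by omega : (0:Int) < e), mul_comm, ← hc]
    exact hn
  · rintro h ⟨d, m, hd1, hd2, hd3, hd4, hd5⟩
    exact h d hd1 (by nlinarith) ⟨m, hd5⟩

-- the initial table: True exactly at positions 2 ≤ n < limit+1
theorem sieve0_getD (N : Nat) (n : Nat) :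
    ((((Array.replicate N true).setIfInBounds 0 false).setIfInBounds 1 false).getD n false = true)
      ↔ (2 ≤ n ∧ n < N) := by
  by_cases hn : n < N
  · match n, hn with
    | 0, h => simp [Array.getD, h]
    | 1, h => simp [Array.getD, h]
    | (k + 2), h => simp [Array.getD, h]
  · rw [Array.getD_eq_getD_getElem?, Array.getElem?_eq_none (by simpa using not_lt.mp hn)]
    simp; omega

-- the assembled sieve agrees with A's is_prime on every candidate of the scan
theorem sieve_eq_isPrimeA (limit : Int) (hlim : 2 ≤ limit) (n : Int)
    (hn0 : 0 ≤ n) (hn : n ≤ limit) :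
    ((sieveLoopB limit.toNat limit
        (((Array.replicate (limit + 1).toNat true).setIfInBounds 0 false).setIfInBounds 1 false) 2).getD
        n.toNat false)
      = isPrimeA n := by
  have hcast : n = ((n.toNat : Nat) : Int) := by omega
  have hiff := sieveLoopB_getD limit.toNat limit 2
    (((Array.replicate (limit + 1).toNat true).setIfInBounds 0 false).setIfInBounds 1 false)
    n.toNat (le_rfl) (by omega)
  rw [sieve0_getD ((limit + 1).toNat) n.toNat,
      not_marked_iff limit n.toNat (by omega)] at hiff
  have hns : NoSmallDiv ((n.toNat : Nat) : Int) ↔ NoSmallDiv n := by rw [← hcast]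
  rw [hns] at hiff
  rw [Bool.eq_iff_iff, hiff, isPrimeA_iff n]
  constructor
  · intro ⟨⟨ha, _⟩, hc⟩; exact ⟨by omega, hc⟩
  · intro ⟨ha, hc⟩; exact ⟨⟨by omega, by omega⟩, hc⟩

-- ===== VERDICT (by name: the statement is the Claim_ definition above) =====
theorem find_prime_palindromes_spec : Claim_equal_find_prime_palindromes := by
  intro limit _
  unfold Spec_find_prime_palindromes find_prime_palindromes find_prime_palindromes_alt
  rw [PySem.List.foldl_append_if_eq_filter]
  by_cases hlim : limit < 2
  · rw [if_pos hlim]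
    simp only [List.nil_append]
    rw [List.filter_eq_nil_iff]
    intro n hn
    rw [PySem.List.mem_pyRange_one] at hn
    have : isPrimeA n = false := by
      cases hx : isPrimeA n
      · rfl
      · have := (isPrimeA_iff n).mp hx; omega
    simp [this]
  · rw [if_neg hlim]
    simp only [List.nil_append]
    apply List.filter_congr
    intro n hn
    rw [PySem.List.mem_pyRange_one] at hn
    rw [sieve_eq_isPrimeA limit (by omega) n (by omega) (by omega), Bool.and_comm]
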